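-- pv_equiv track=rewrite | github.com/involutefish/pitch_class_Set_calculator_expansion | find_tetrachords_GUI.py | forte_normal_form
-- ===== SOURCE A (Python) =====
-- def generate_rotations(pcs):
--     """生成集合的所有轮转排列"""
--     pcs={int(x) for x in pcs.split(",") if x.strip().isdigit()}
--     pcs_sorted = sorted(pcs)  # 先对集合进行升序排序
--     return [pcs_sorted[i:] + pcs_sorted[:i] for i in range(len(pcs_sorted))]
--
-- def compacted_sets(pcs):
--     rotations = generate_rotations(pcs)  # 生成所有轮转排列
--     interval_set = []  # 存储所有轮转排列的宽度
--     # 计算每个轮转排列的宽度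
--     for ps in rotations:
--         interval = (ps[-1] - ps[0]) % 12
--         interval_set.append(interval)
--     # 找到最小值及其索引
--     min_value = min(interval_set)  # 获取最小宽度
--     min_indices = [index for index, value in enumerate(interval_set) if value == min_value]  # 获取最小值的索引
--     #输出最窄集合
--     compacted_sets=[]
--     for i in min_indices:
--         compacted_sets.append(rotations[i])
--     return compacted_sets
--
-- def forte_normal_form(pcs):
--     set_list = compacted_sets(pcs)  # 获取最窄集合
--     if len(set_list) == 1:
--         return set_list[0]  # 如果只有一个最窄集合，则直接输出
--     def recursive_selection(sets, index):
--         #如果最窄集合只有一个，那么直接输出就是福特标准型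
--         if len(sets) == 1 or index >= len(sets[0]):
--             return min(sets)  # 若最终仍有多个集合，则选取最左侧最小者
--         #开始计算
--         interval_diffs = []
--         for ps in sets:
--             interval = (ps[index] - ps[0]) % 12  # 计算第2, 3, ..., index个音与第1个音在12模下的音程
--             interval_diffs.append(interval)
--         min_value = min(interval_diffs)  # 获取最小音程
--         min_indices = [i for i, value in enumerate(interval_diffs) if value == min_value]  # 获取最小值索引
--         filtered_sets = [sets[i] for i in min_indices]  # 获取符合条件的集合
--         return recursive_selection(filtered_sets, index + 1)  # 递归继续计算下一个音程
--     forte_normal_form = recursive_selection(set_list, 1)  # 计算最终福特标准型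
--     return forte_normal_form
-- ===== SOURCE B (Python) =====
-- def forte_normal_form(pcs):
--     vals = sorted({int(x) for x in pcs.split(",") if x.strip().isdigit()})
--     n = len(vals)
--     rotations = [vals[i:] + vals[:i] for i in range(n)]
--     return min(rotations, key=lambda ps: [(ps[-1] - ps[0]) % 12]
--                + [(ps[j] - ps[0]) % 12 for j in range(1, n)]
--                + ps)
-- ===== Notes on version B (the rewrite author's own statement) =====
-- stated objective: simpler
-- what changed: B drops compacted_sets' width-filter stage and the recursive_selection helper entirely and instead takes min() over all rotations under one lexicographic key [width] + interval-from-first list + rotation, which reproduces A's staged filtering and final min(sets) tie-break in a single pass.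
import Mathlib
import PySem

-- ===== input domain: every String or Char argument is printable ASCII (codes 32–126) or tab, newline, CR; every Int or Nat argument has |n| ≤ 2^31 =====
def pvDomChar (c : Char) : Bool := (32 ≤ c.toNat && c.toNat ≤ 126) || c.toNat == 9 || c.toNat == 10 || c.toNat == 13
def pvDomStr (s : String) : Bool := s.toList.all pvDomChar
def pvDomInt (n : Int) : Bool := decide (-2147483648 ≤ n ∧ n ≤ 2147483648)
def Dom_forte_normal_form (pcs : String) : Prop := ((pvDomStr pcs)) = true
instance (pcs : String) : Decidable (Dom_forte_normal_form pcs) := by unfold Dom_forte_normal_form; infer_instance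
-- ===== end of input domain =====

-- B replaces A's width filter (compacted_sets) plus recursive interval selection by ONE min() over all
-- rotations under the lexicographic key [width] + interval-from-first list + rotation (objective: simpler).

-- ===== PORT A =====
-- '(ps[i] - ps[0]) % 12' exactly as both Pythons write it (i = -1 gives the '(ps[-1]-ps[0]) % 12' width)
def pvInterval (ps : List Int) (i : Int) : Int :=
  PySem.Int.mod ((PySem.List.pyGet? ps i).getD 0 - (PySem.List.pyGet? ps 0).getD 0) 12

def pvGenerateRotations (pcs : String) : List (List Int) :=
  let s : PySem.Set Int := PySem.Set.ofList ((((PySem.Str.split? pcs ",").getD []).filter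
      (fun x => PySem.Str.strIsdigit (PySem.Str.strip x))).map (fun x => (PySem.Int.ofStr? x).getD 0))
  let pcs_sorted := PySem.List.sorted s (fun x => x)
  (PySem.List.pyRange 0 pcs_sorted.length 1).map (fun i =>
    PySem.List.slice pcs_sorted (some i) none ++ PySem.List.slice pcs_sorted none (some i))

def pvCompactedSets (pcs : String) : List (List Int) :=
  let rotations := pvGenerateRotations pcs
  let interval_set := rotations.map (fun ps => pvInterval ps (-1))
  -- min([]) raises ValueError in Python; Pre_ excludes exactly that case, the default is never used there
  let min_value := (PySem.List.min? interval_set (fun v => v)).getD 0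
  let min_indices := ((PySem.List.enumerate interval_set).filter (fun p => p.2 == min_value)).map (fun p => p.1)
  min_indices.map (fun i => (PySem.List.pyGet? rotations i).getD [])

-- recursive_selection; 'fuel' only makes the recursion structural (depth is bounded by len(sets[0]),
-- and the call below passes len(set_list[0]) + 1, so the fuel-0 branch is never reached)
def pvRecSel (fuel : Nat) (sets : List (List Int)) (index : Int) : List Int :=
  if sets.length == 1 || decide ((((PySem.List.pyGet? sets 0).getD []).length : Int) ≤ index) then
    (PySem.List.min? sets (fun s => s)).getD []
  else
    match fuel with
    | 0 => []
    | fuel' + 1 =>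
      let interval_diffs := sets.map (fun ps => pvInterval ps index)
      let min_value := (PySem.List.min? interval_diffs (fun v => v)).getD 0
      let min_indices := ((PySem.List.enumerate interval_diffs).filter (fun p => p.2 == min_value)).map (fun p => p.1)
      let filtered_sets := min_indices.map (fun i => (PySem.List.pyGet? sets i).getD [])
      pvRecSel fuel' filtered_sets (index + 1)

def forte_normal_form (pcs : String) : List Int :=
  let set_list := pvCompactedSets pcs
  if set_list.length == 1 then
    (PySem.List.pyGet? set_list 0).getD []
  else
    pvRecSel (((PySem.List.pyGet? set_list 0).getD []).length + 1) set_list 1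

-- ===== PORT B =====
def forte_normal_form_alt (pcs : String) : List Int :=
  let vals := PySem.List.sorted (PySem.Set.ofList ((((PySem.Str.split? pcs ",").getD []).filter
      (fun x => PySem.Str.strIsdigit (PySem.Str.strip x))).map (fun x => (PySem.Int.ofStr? x).getD 0))) (fun x => x)
  let n := vals.length
  let rotations := (PySem.List.pyRange 0 n 1).map (fun i =>
    PySem.List.slice vals (some i) none ++ PySem.List.slice vals none (some i))
  -- min([], key=…) raises ValueError in Python; Pre_ excludes that, the default is never used there
  (PySem.List.min? rotations (fun ps =>
    pvInterval ps (-1) :: ((PySem.List.pyRange 1 (n : Int) 1).map (fun j => pvInterval ps j) ++ ps))).getD []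

-- ===== PRECONDITION & SPEC =====
-- 'x.strip().isdigit()' spelled out on code points: whitespace-wrapped run of decimal digits
def pvDigitTok (x : String) : Bool :=
  let cs := ((x.toList.dropWhile (fun c => PySem.Chars.isspace c)).reverse.dropWhile
      (fun c => PySem.Chars.isspace c)).reverse
  !cs.isEmpty && cs.all (fun c => PySem.Chars.isdigit c)

-- Pre_ excludes exactly the inputs with no comma-separated digit token: there A (and B) raise
-- ValueError on min() of an empty sequence.
def Pre_forte_normal_form (pcs : String) : Prop :=
  ((PySem.Str.split? pcs ",").getD []).filter (fun x => pvDigitTok x) ≠ []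
instance (pcs : String) : Decidable (Pre_forte_normal_form pcs) := by
  unfold Pre_forte_normal_form; infer_instance

def pvWitness_forte_normal_form : String := "0,4,8"

def Spec_forte_normal_form (pcs : String) (out : List Int) : Prop := out = forte_normal_form_alt pcs
instance (pcs : String) (out : List Int) : Decidable (Spec_forte_normal_form pcs out) := by
  unfold Spec_forte_normal_form; infer_instance

-- ===== CLAIM (what is proved, stated in full; the proofs are below) =====
def Claim_equal_forte_normal_form : Prop := ∀ (pcs : String), Dom_forte_normal_form pcs →
  Pre_forte_normal_form pcs → Spec_forte_normal_form pcs (forte_normal_form pcs)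

-- ===== LEMMAS AND PROOFS =====

-- interval-from-first at Nat position i (0 on out-of-range, matching the in-range uses below)
def pvD (i : Nat) (ps : List Int) : Int := PySem.Int.mod (ps.getD i 0 - ps.getD 0 0) 12
-- tail key from position i: intervals at positions i, i+1, …, n-1, then the rotation itself
def pvTK (n i : Nat) (ps : List Int) : List Int := (List.range' i (n - i)).map (fun j => pvD j ps) ++ ps
-- the full selection key: width, then intervals from position 1, then the rotation
def pvKeyN (n : Nat) (ps : List Int) : List Int := pvD (n - 1) ps :: pvTK n 1 ps

lemma pvInterval_neg_one (ps : List Int) : pvInterval ps (-1) = pvD (ps.length - 1) ps := by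
  unfold pvInterval pvD
  rw [PySem.List.pyGet?_neg_one, PySem.List.pyGet?_zero]
  rw [List.getLast?_eq_getElem?]
  simp [List.getD_eq_getElem?_getD]

lemma pvInterval_natCast (ps : List Int) (i : Nat) : pvInterval ps (i : Int) = pvD i ps := by
  unfold pvInterval pvD
  rw [PySem.List.pyGet?_natCast, PySem.List.pyGet?_zero]
  simp [List.getD_eq_getElem?_getD]

lemma pvTK_stop {n i : Nat} (h : n ≤ i) (ps : List Int) : pvTK n i ps = ps := by
  unfold pvTK
  rw [Nat.sub_eq_zero_of_le h]
  simp

lemma pvTK_cons {n i : Nat} (h : i < n) (ps : List Int) :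
    pvTK n i ps = pvD i ps :: pvTK n (i + 1) ps := by
  unfold pvTK
  have h1 : n - i = (n - (i + 1)) + 1 := by omega
  rw [h1, List.range'_succ]
  simp

lemma pv_le_of_head_lt {a b : Int} {l m : List Int} (h : a < b) : (a :: l) ≤ (b :: m) := by
  apply le_of_lt
  rw [List.cons_lt_cons_iff]
  exact Or.inl h

lemma pv_le_cons_of_le (a : Int) {l m : List Int} (h : l ≤ m) : (a :: l) ≤ (a :: m) := by
  rw [← not_lt] at h ⊢
  intro hc
  rw [List.cons_lt_cons_iff] at hc
  rcases hc with h1 | ⟨h1, h2⟩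
  · omega
  · exact h h2

-- the PySem.List.min? on List-Int keys, rewritten to the LinearOrder instances (they are rfl-equal)
lemma pv_min?_eq (xs : List (List Int)) (key : List Int → List Int) :
    PySem.List.min? xs key =
      @PySem.List.min? _ _ List.instLinearOrder.toLT LinearOrder.toDecidableLT xs key := by
  congr 1

lemma pv_min?_isMin_list {xs : List (List Int)} {key : List Int → List Int} {m : List Int}
    (h : PySem.List.min? xs key = some m) : ∀ y ∈ xs, key m ≤ key y := by
  rw [pv_min?_eq] at h
  exact PySem.List.min?_isMin h

-- '[xs[i] for i in [index for index, v in enumerate(map(f, xs)) if v == c]]' IS 'filter (f · == c)'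
lemma pv_sel_filter {α : Type} (f : α → Int) (c : Int) (dflt : α) :
    ∀ (xs pre : List α),
      ((((PySem.List.enumerate (xs.map f) (pre.length : Int)).filter (fun p => p.2 == c)).map
          (fun p => p.1)).map (fun i => (PySem.List.pyGet? (pre ++ xs) i).getD dflt))
        = xs.filter (fun x => f x == c) := by
  intro xs
  induction xs with
  | nil => intro pre; simp [PySem.List.enumerate_nil]
  | cons x t ih =>
    intro pre
    rw [List.map_cons, PySem.List.enumerate_cons]
    have hlen : (pre.length : Int) + 1 = ((pre ++ [x]).length : Int) := by simp
    have happ : pre ++ x :: t = (pre ++ [x]) ++ t := by simp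
    by_cases hc : (f x == c) = true
    · rw [List.filter_cons_of_pos (by simpa using hc), List.map_cons, List.map_cons]
      rw [show List.filter (fun x => f x == c) (x :: t) = x :: List.filter (fun x => f x == c) t
          from List.filter_cons_of_pos hc]
      congr 1
      · show (PySem.List.pyGet? (pre ++ x :: t) (pre.length : Int)).getD dflt = x
        rw [PySem.List.pyGet?_append_length]
        rfl
      · rw [hlen, happ]
        exact ih (pre ++ [x])
    · rw [List.filter_cons_of_neg (by simpa using hc)]
      rw [show List.filter (fun x => f x == c) (x :: t) = List.filter (fun x => f x == c) t
          from List.filter_cons_of_neg hc]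
      rw [hlen, happ]
      exact ih (pre ++ [x])

lemma pv_sel_filter0 {α : Type} (f : α → Int) (c : Int) (dflt : α) (xs : List α) :
    ((((PySem.List.enumerate (xs.map f)).filter (fun p => p.2 == c)).map
        (fun p => p.1)).map (fun i => (PySem.List.pyGet? xs i).getD dflt))
      = xs.filter (fun x => f x == c) := by
  have := pv_sel_filter f c dflt xs []
  simpa using this

lemma pv_min_map {α : Type} (xs : List α) (g : α → Int) {m : Int}
    (h : PySem.List.min? (xs.map g) (fun v => v) = some m) :
    (∃ x ∈ xs, g x = m) ∧ ∀ x ∈ xs, m ≤ g x := by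
  constructor
  · have hm := PySem.List.min?_mem h
    rw [List.mem_map] at hm
    obtain ⟨x, hx, he⟩ := hm
    exact ⟨x, hx, he⟩
  · intro x hx
    exact PySem.List.min?_isMin h (g x) (List.mem_map_of_mem hx)

lemma pv_min_stop (sets : List (List Int)) (hne : sets ≠ []) :
    ∃ m, PySem.List.min? sets (fun s => s) = some m ∧ m ∈ sets ∧ ∀ y ∈ sets, m ≤ y := by
  obtain ⟨m, hm⟩ : ∃ m, PySem.List.min? sets (fun s => s) = some m := by
    cases h : PySem.List.min? sets (fun s => s) with
    | none => exact absurd ((PySem.List.min?_eq_none_iff _ _).1 h) hne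
    | some m => exact ⟨m, rfl⟩
  exact ⟨m, hm, PySem.List.min?_mem hm, pv_min?_isMin_list hm⟩

lemma pvRecSel_spec (n : Nat) :
    ∀ (fuel : Nat) (sets : List (List Int)) (i : Nat),
      sets ≠ [] → (∀ ps ∈ sets, ps.length = n) → 1 ≤ i → n < i + fuel →
      pvRecSel fuel sets (i : Int) ∈ sets ∧
        ∀ y ∈ sets, pvTK n i (pvRecSel fuel sets (i : Int)) ≤ pvTK n i y := by
  intro fuel
  induction fuel with
  | zero =>
    intro sets i hne hlen h1 hfuel
    obtain ⟨s0, rest, rfl⟩ : ∃ s0 rest, sets = s0 :: rest := by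
      cases sets with
      | nil => exact absurd rfl hne
      | cons a b => exact ⟨a, b, rfl⟩
    have hni : n ≤ i := by omega
    have hcond : ((s0 :: rest).length == 1
        || decide ((((PySem.List.pyGet? (s0 :: rest) 0).getD []).length : Int) ≤ (i : Int))) = true := by
      rw [PySem.List.pyGet?_zero_cons]
      have : s0.length = n := hlen s0 (by simp)
      simp [this]
      omega
    rw [pvRecSel, if_pos hcond]
    obtain ⟨m, hm, hmem, hmin⟩ := pv_min_stop (s0 :: rest) hne
    rw [hm]
    refine ⟨hmem, fun y hy => ?_⟩
    rw [pvTK_stop hni, pvTK_stop hni]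
    exact hmin y hy
  | succ f ih =>
    intro sets i hne hlen h1 hfuel
    obtain ⟨s0, rest, rfl⟩ : ∃ s0 rest, sets = s0 :: rest := by
      cases sets with
      | nil => exact absurd rfl hne
      | cons a b => exact ⟨a, b, rfl⟩
    have hs0 : s0.length = n := hlen s0 (by simp)
    by_cases hni : n ≤ i
    · have hcond : ((s0 :: rest).length == 1
          || decide ((((PySem.List.pyGet? (s0 :: rest) 0).getD []).length : Int) ≤ (i : Int))) = true := by
        rw [PySem.List.pyGet?_zero_cons]
        simp [hs0]
        omega
      rw [pvRecSel, if_pos hcond]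
      obtain ⟨m, hm, hmem, hmin⟩ := pv_min_stop (s0 :: rest) hne
      rw [hm]
      refine ⟨hmem, fun y hy => ?_⟩
      rw [pvTK_stop hni, pvTK_stop hni]
      exact hmin y hy
    · have hilt : i < n := by omega
      by_cases hone : (s0 :: rest).length = 1
      · have hrest : rest = [] := by
          simpa using hone
        subst hrest
        have hcond : (([s0] : List (List Int)).length == 1
            || decide ((((PySem.List.pyGet? ([s0] : List (List Int)) 0).getD []).length : Int) ≤ (i : Int))) = true := by
          simp
        rw [pvRecSel, if_pos hcond]
        obtain ⟨m, hm, hmem, hmin⟩ := pv_min_stop [s0] (by simp)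
        rw [hm]
        have hms : m = s0 := by simpa using hmem
        subst hms
        exact ⟨by simp, fun y hy => by simp at hy; subst hy; exact le_refl _⟩
      · have hcond : ((s0 :: rest).length == 1
            || decide ((((PySem.List.pyGet? (s0 :: rest) 0).getD []).length : Int) ≤ (i : Int))) = false := by
          rw [PySem.List.pyGet?_zero_cons]
          have hr : rest ≠ [] := by intro h; subst h; simp at hone
          rcases rest with _ | ⟨r1, rest'⟩
          · exact absurd rfl hr
          · simp only [Option.getD_some, List.length_cons, Bool.or_eq_false_iff]
            constructor
            · simp
            · simp only [decide_eq_false_iff_not, not_le]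
              omega
        rw [pvRecSel, if_neg (ne_true_of_eq_false hcond)]
        dsimp only []
        obtain ⟨mv, hmv⟩ : ∃ mv,
            PySem.List.min? ((s0 :: rest).map (fun ps => pvInterval ps (i : Int))) (fun v => v) = some mv := by
          cases h : PySem.List.min? ((s0 :: rest).map (fun ps => pvInterval ps (i : Int))) (fun v => v) with
          | none => simp [PySem.List.min?_eq_none_iff] at h
          | some m => exact ⟨m, rfl⟩
        rw [hmv]
        simp only [Option.getD_some]
        obtain ⟨⟨x0, hx0, hx0e⟩, hminall⟩ := pv_min_map (s0 :: rest) (fun ps => pvInterval ps (i : Int)) hmv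
        rw [pv_sel_filter0 (fun ps => pvInterval ps (i : Int)) mv ([] : List Int) (s0 :: rest)]
        set filtered := (s0 :: rest).filter (fun ps => pvInterval ps (i : Int) == mv) with hfdef
        have hfne : filtered ≠ [] := by
          have : x0 ∈ filtered := List.mem_filter.2 ⟨hx0, by simpa using hx0e⟩
          intro hc; rw [hc] at this; simp at this
        have hflen : ∀ ps ∈ filtered, ps.length = n := fun ps hps => hlen ps (List.mem_of_mem_filter hps)
        have hcast : ((i : Int) + 1) = (((i + 1 : Nat)) : Int) := by push_cast; ring
        rw [hcast]
        obtain ⟨hrmem, hrtk⟩ := ih filtered (i + 1) hfne hflen (by omega) (by omega)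
        refine ⟨List.mem_of_mem_filter hrmem, fun y hy => ?_⟩
        set r := pvRecSel f filtered (((i + 1 : Nat)) : Int) with hrdef
        have hrlen : r.length = n := hflen r hrmem
        have hDr : pvD i r = mv := by
          have := (List.mem_filter.1 hrmem).2
          rw [← pvInterval_natCast]
          simpa using this
        have hDy : mv ≤ pvD i y := by
          rw [← pvInterval_natCast]
          exact hminall y hy
        rw [pvTK_cons hilt, pvTK_cons hilt]
        rcases lt_or_eq_of_le hDy with hlt | heq
        · exact pv_le_of_head_lt (by rw [hDr]; exact hlt)
        · have hyf : y ∈ filtered := List.mem_filter.2 ⟨hy, by rw [← pvInterval_natCast] at heq; simp [← heq]⟩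
          rw [hDr, ← heq]
          exact pv_le_cons_of_le mv (hrtk y hyf)

lemma pvDigitTok_eq (x : String) :
    pvDigitTok x = PySem.Str.strIsdigit (PySem.Str.strip x) := by
  simp [pvDigitTok, PySem.Str.strIsdigit, PySem.Str.strip, PySem.Chars.strIsdigit,
    PySem.Chars.strip, PySem.Chars.lstrip, PySem.Chars.rstrip]

-- the shared 'sorted(set(int-tokens))' value both ports start from
def pvV (pcs : String) : List Int :=
  PySem.List.sorted (PySem.Set.ofList ((((PySem.Str.split? pcs ",").getD []).filter
      (fun x => PySem.Str.strIsdigit (PySem.Str.strip x))).map (fun x => (PySem.Int.ofStr? x).getD 0))) (fun x => x)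

lemma pvRots (V : List Int) :
    (PySem.List.pyRange 0 (V.length : Int) 1).map (fun i =>
      PySem.List.slice V (some i) none ++ PySem.List.slice V none (some i))
    = (List.range V.length).map (fun k => V.drop k ++ V.take k) := by
  rw [PySem.List.pyRange_one, List.map_map]
  have h0 : ((V.length : Int) - 0).toNat = V.length := by omega
  rw [h0]
  apply List.map_congr_left
  intro k hk
  show PySem.List.slice V (some (0 + (k : Int))) none ++ PySem.List.slice V none (some (0 + (k : Int)))
      = V.drop k ++ V.take k
  rw [zero_add, PySem.List.slice_from_natCast, PySem.List.slice_to_natCast]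

lemma pvGen_eq (pcs : String) :
    pvGenerateRotations pcs
      = (List.range (pvV pcs).length).map (fun k => (pvV pcs).drop k ++ (pvV pcs).take k) := by
  unfold pvGenerateRotations pvV
  dsimp only []
  exact pvRots _

lemma pvAlt_eq (pcs : String) :
    forte_normal_form_alt pcs
      = (PySem.List.min? (pvGenerateRotations pcs) (fun ps =>
          pvInterval ps (-1) ::
            ((PySem.List.pyRange 1 ((pvV pcs).length : Int) 1).map (fun j => pvInterval ps j) ++ ps))).getD [] := by
  unfold forte_normal_form_alt pvGenerateRotations pvV
  dsimp only []

lemma pvKeyB_eq {n : Nat} (ps : List Int) (hlen : ps.length = n) :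
    (pvInterval ps (-1) :: ((PySem.List.pyRange 1 (n : Int) 1).map (fun j => pvInterval ps j) ++ ps))
      = pvKeyN n ps := by
  unfold pvKeyN
  congr 1
  · rw [pvInterval_neg_one, hlen]
  · unfold pvTK
    congr 1
    rw [PySem.List.pyRange_one]
    have h1 : ((n : Int) - 1).toNat = n - 1 := by omega
    rw [h1, List.range'_eq_map_range, List.map_map, List.map_map]
    apply List.map_congr_left
    intro k hk
    show pvInterval ps ((1 : Int) + (k : Int)) = pvD (1 + k) ps
    have h2 : ((1 : Int) + (k : Int)) = (((1 + k : Nat)) : Int) := by push_cast; ring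
    rw [h2, pvInterval_natCast]

lemma pvCompacted_char (pcs : String) (h : pvGenerateRotations pcs ≠ []) :
    ∃ m, PySem.List.min? ((pvGenerateRotations pcs).map (fun ps => pvInterval ps (-1))) (fun v => v) = some m ∧
      pvCompactedSets pcs = (pvGenerateRotations pcs).filter (fun ps => pvInterval ps (-1) == m) := by
  obtain ⟨m, hm⟩ : ∃ m, PySem.List.min? ((pvGenerateRotations pcs).map (fun ps => pvInterval ps (-1)))
      (fun v => v) = some m := by
    cases h' : PySem.List.min? ((pvGenerateRotations pcs).map (fun ps => pvInterval ps (-1))) (fun v => v) with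
    | none =>
      rw [PySem.List.min?_eq_none_iff, List.map_eq_nil_iff] at h'
      exact absurd h' h
    | some m => exact ⟨m, rfl⟩
  refine ⟨m, hm, ?_⟩
  unfold pvCompactedSets
  dsimp only []
  rw [hm]
  simp only [Option.getD_some]
  exact pv_sel_filter0 _ _ _ _

-- ===== VERDICT (by name: the statement is the Claim_ definition above) =====
set_option maxHeartbeats 1000000 in
theorem forte_normal_form_spec : Claim_equal_forte_normal_form := by
  intro pcs hdom hpre
  unfold Spec_forte_normal_form
  unfold Pre_forte_normal_form at hpre
  have hpre' : ((PySem.Str.split? pcs ",").getD []).filter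
      (fun x => PySem.Str.strIsdigit (PySem.Str.strip x)) ≠ [] := by
    rw [show ((PySem.Str.split? pcs ",").getD []).filter (fun x => PySem.Str.strIsdigit (PySem.Str.strip x))
        = ((PySem.Str.split? pcs ",").getD []).filter (fun x => pvDigitTok x)
      from List.filter_congr (fun x _ => (pvDigitTok_eq x).symm)]
    exact hpre
  -- V = sorted(set(parsed ints)) is nonempty
  have hVne : pvV pcs ≠ [] := by
    unfold pvV
    rw [Ne, PySem.List.sorted_eq_nil_iff]
    intro hS
    rcases hL : ((PySem.Str.split? pcs ",").getD []).filter
        (fun x => PySem.Str.strIsdigit (PySem.Str.strip x)) with _ | ⟨x, t⟩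
    · exact hpre' hL
    · have : ((PySem.Int.ofStr? x).getD 0) ∈ PySem.Set.ofList ((((PySem.Str.split? pcs ",").getD []).filter
          (fun x => PySem.Str.strIsdigit (PySem.Str.strip x))).map (fun x => (PySem.Int.ofStr? x).getD 0)) := by
        rw [PySem.Set.mem_ofList]
        rw [hL]
        simp
      rw [hS] at this
      simp at this
  set V := pvV pcs with hVdef
  set n := V.length with hndef
  have hn : 1 ≤ n := by
    rcases V with _ | ⟨v, vs⟩
    · exact absurd rfl hVne
    · simp [hndef]
  set R := pvGenerateRotations pcs with hRdef
  have hRrot : R = (List.range n).map (fun k => V.drop k ++ V.take k) := pvGen_eq pcs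
  have hRne : R ≠ [] := by
    rw [hRrot]
    intro hc
    rw [List.map_eq_nil_iff, List.range_eq_nil] at hc
    omega
  have hRlen : ∀ ps ∈ R, ps.length = n := by
    intro ps hps
    rw [hRrot, List.mem_map] at hps
    obtain ⟨k, hk, rfl⟩ := hps
    rw [List.mem_range] at hk
    simp only [List.length_append, List.length_drop, List.length_take]
    omega
  -- A-side characterisation
  obtain ⟨m, hm, hC⟩ := pvCompacted_char pcs hRne
  obtain ⟨⟨x0, hx0R, hx0w⟩, hwmin⟩ := pv_min_map R (fun ps => pvInterval ps (-1)) hm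
  have hCne : pvCompactedSets pcs ≠ [] := by
    rw [hC]
    intro hc
    have : x0 ∈ R.filter (fun ps => pvInterval ps (-1) == m) :=
      List.mem_filter.2 ⟨hx0R, by simpa using hx0w⟩
    rw [hc] at this
    simp at this
  have hAchar : forte_normal_form pcs ∈ pvCompactedSets pcs ∧
      ∀ y ∈ pvCompactedSets pcs, pvTK n 1 (forte_normal_form pcs) ≤ pvTK n 1 y := by
    unfold forte_normal_form
    dsimp only []
    by_cases hone : (pvCompactedSets pcs).length = 1
    · obtain ⟨c, hc⟩ := List.length_eq_one_iff.1 hone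
      rw [if_pos (by simp [hone])]
      rw [hc, PySem.List.pyGet?_zero_cons]
      simp only [Option.getD_some]
      exact ⟨by simp, by intro y hy; simp at hy; subst hy; exact le_refl _⟩
    · rw [if_neg (by simpa using hone)]
      obtain ⟨c0, crest, hcc⟩ : ∃ c0 crest, pvCompactedSets pcs = c0 :: crest := by
        rcases hx : pvCompactedSets pcs with _ | ⟨a, b⟩
        · exact absurd hx hCne
        · exact ⟨a, b, rfl⟩
      have hc0len : c0.length = n := hRlen c0 (List.mem_of_mem_filter (hC ▸ (hcc ▸ (by simp : c0 ∈ c0 :: crest))))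
      rw [hcc, PySem.List.pyGet?_zero_cons]
      simp only [Option.getD_some]
      rw [hc0len, ← hcc]
      have hspec := pvRecSel_spec n (n + 1) (pvCompactedSets pcs) 1 hCne
        (fun ps hps => hRlen ps (List.mem_of_mem_filter (hC ▸ hps))) (le_refl 1) (by omega)
      have h1c : ((1 : Nat) : Int) = (1 : Int) := by norm_num
      rw [h1c] at hspec
      exact hspec
  obtain ⟨a, ha⟩ : ∃ a, forte_normal_form pcs = a := ⟨_, rfl⟩
  rw [ha] at hAchar
  have hAmemC : a ∈ R.filter (fun ps => pvInterval ps (-1) == m) := hC ▸ hAchar.1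
  have hAmem : a ∈ R := List.mem_of_mem_filter hAmemC
  have halen : a.length = n := hRlen a hAmem
  have hwa : pvInterval a (-1) = m := by
    have := (List.mem_filter.1 hAmemC).2
    simpa using this
  have hAmin : ∀ y ∈ R, pvKeyN n a ≤ pvKeyN n y := by
    intro y hy
    have hylen : y.length = n := hRlen y hy
    have hya : pvD (n - 1) a = m := by
      rw [← halen, ← pvInterval_neg_one]
      exact hwa
    have hmy : m ≤ pvD (n - 1) y := by
      rw [← hylen, ← pvInterval_neg_one]
      exact hwmin y hy
    unfold pvKeyN
    rcases lt_or_eq_of_le hmy with hlt | heq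
    · exact pv_le_of_head_lt (by rw [hya]; exact hlt)
    · have hyC : y ∈ pvCompactedSets pcs := by
        rw [hC]
        refine List.mem_filter.2 ⟨hy, ?_⟩
        have : pvInterval y (-1) = m := by
          rw [pvInterval_neg_one, hylen, ← heq]
        simpa using this
      rw [hya, ← heq]
      exact pv_le_cons_of_le m (hAchar.2 y hyC)
  -- B-side
  obtain ⟨b, hb⟩ : ∃ b, PySem.List.min? R (fun ps =>
      pvInterval ps (-1) :: ((PySem.List.pyRange 1 (n : Int) 1).map (fun j => pvInterval ps j) ++ ps))
        = some b := by
    cases h' : PySem.List.min? R (fun ps =>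
        pvInterval ps (-1) :: ((PySem.List.pyRange 1 (n : Int) 1).map (fun j => pvInterval ps j) ++ ps)) with
    | none => rw [PySem.List.min?_eq_none_iff] at h'; exact absurd h' hRne
    | some b => exact ⟨b, rfl⟩
  have hBmem : b ∈ R := PySem.List.min?_mem hb
  have hblen : b.length = n := hRlen b hBmem
  have hBminRaw := pv_min?_isMin_list hb
  have hBmin : ∀ y ∈ R, pvKeyN n b ≤ pvKeyN n y := by
    intro y hy
    have := hBminRaw y hy
    rwa [pvKeyB_eq b hblen, pvKeyB_eq y (hRlen y hy)] at this
  -- keys agree, hence the rotations agree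
  have hk1 : pvKeyN n a ≤ pvKeyN n b := hAmin b hBmem
  have hk2 : pvKeyN n b ≤ pvKeyN n a := hBmin a hAmem
  have hkeq : pvKeyN n a = pvKeyN n b := le_antisymm hk1 hk2
  have hab : a = b := by
    unfold pvKeyN pvTK at hkeq
    have htail := (List.cons.injEq _ _ _ _ ▸ hkeq).2
    exact List.append_inj_right htail (by simp)
  rw [ha, pvAlt_eq pcs, ← hVdef, ← hndef, ← hRdef, hb]
  simpa using hab
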